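-- pv_equiv track=rewrite | github.com/Pratham200Rajbhar/KeplerLab-Agentic | backend/app/services/tools/web_search_tool.py | _domain_score
-- ===== SOURCE A (Python) =====
-- _PREFERRED_DOMAINS = {
--     "huggingface.co",
--     "github.com",
--     "arxiv.org",
--     "wikipedia.org",
--     "paperswithcode.com",
--     "ai.meta.com",
--     "mistral.ai",
--     "openai.com",
--     "anthropic.com",
-- }
--
-- _LOW_SIGNAL_DOMAINS = {
--     "medium.com",
--     "hashnode.dev",
--     "linkedin.com",
--     "facebook.com",
--     "instagram.com",
--     "tiktok.com",
--     "pinterest.com",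
-- }
--
-- def _domain_score(domain: str) -> int:
--     if not domain:
--         return 0
--     if domain in _PREFERRED_DOMAINS:
--         return 3
--     if any(domain.endswith(f".{d}") for d in _PREFERRED_DOMAINS):
--         return 2
--     if domain in _LOW_SIGNAL_DOMAINS or any(domain.endswith(f".{d}") for d in _LOW_SIGNAL_DOMAINS):
--         return -2
--     return 1
-- ===== SOURCE B (Python) =====
-- _PREFERRED_DOMAINS = {
--     "huggingface.co",
--     "github.com",
--     "arxiv.org",
--     "wikipedia.org",
--     "paperswithcode.com",
--     "ai.meta.com",
--     "mistral.ai",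
--     "openai.com",
--     "anthropic.com",
-- }
--
-- _LOW_SIGNAL_DOMAINS = {
--     "medium.com",
--     "hashnode.dev",
--     "linkedin.com",
--     "facebook.com",
--     "instagram.com",
--     "tiktok.com",
--     "pinterest.com",
-- }
--
-- def _domain_score(domain: str) -> int:
--     if not domain:
--         return 0
--     if domain in _PREFERRED_DOMAINS:
--         return 3
--     # every suffix of the domain that starts right after a '.', i.e. its parent-domain chain
--     tails = [domain[i + 1:] for i, ch in enumerate(domain) if ch == '.']
--     if any(t in _PREFERRED_DOMAINS for t in tails):
--         return 2
--     if domain in _LOW_SIGNAL_DOMAINS or any(t in _LOW_SIGNAL_DOMAINS for t in tails):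
--         return -2
--     return 1
-- ===== Notes on version B (the rewrite author's own statement) =====
-- stated objective: idiomatic
-- what changed: Instead of looping over the two constant domain sets testing an endswith of each dotted pattern, B makes one pass over the domain collecting the suffix after every dot (the parent-domain chain) and decides each tier by set membership of those suffixes.
import Mathlib
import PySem

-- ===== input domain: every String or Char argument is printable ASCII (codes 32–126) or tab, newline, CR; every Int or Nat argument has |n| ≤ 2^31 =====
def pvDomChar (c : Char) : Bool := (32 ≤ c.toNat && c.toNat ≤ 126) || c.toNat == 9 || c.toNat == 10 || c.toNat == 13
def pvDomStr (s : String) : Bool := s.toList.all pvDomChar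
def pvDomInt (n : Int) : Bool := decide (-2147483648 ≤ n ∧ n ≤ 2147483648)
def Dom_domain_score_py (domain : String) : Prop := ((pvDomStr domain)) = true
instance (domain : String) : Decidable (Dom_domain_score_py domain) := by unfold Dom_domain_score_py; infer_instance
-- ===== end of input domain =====

-- B replaces A's "loop the two constant sets testing domain.endswith('.'+d)" by one pass over
-- the domain collecting the suffix after each '.', then set lookups (idiomatic; same cost).

-- ===== PORT A =====
-- the module-level constant sets (set-literal iteration order only feeds `any`/membership, so order is immaterial)
def pvPreferred : List (List Char) :=
  ["huggingface.co".toList, "github.com".toList, "arxiv.org".toList, "wikipedia.org".toList,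
   "paperswithcode.com".toList, "ai.meta.com".toList, "mistral.ai".toList, "openai.com".toList,
   "anthropic.com".toList]

def pvLowSignal : List (List Char) :=
  ["medium.com".toList, "hashnode.dev".toList, "linkedin.com".toList, "facebook.com".toList,
   "instagram.com".toList, "tiktok.com".toList, "pinterest.com".toList]

def domain_score_py (domain : String) : Int :=
  let cs := domain.toList
  if cs = [] then 0
  else if pvPreferred.contains cs then 3
  else if pvPreferred.any (fun d => PySem.Chars.endswith cs ('.' :: d)) then 2
  else if pvLowSignal.contains cs || pvLowSignal.any (fun d => PySem.Chars.endswith cs ('.' :: d)) then -2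
  else 1

-- ===== PORT B =====
-- [domain[i + 1:] for i, ch in enumerate(domain) if ch == '.']
def pvTails (cs : List Char) : List (List Char) :=
  (PySem.List.enumerate cs).filterMap
    (fun p => if p.2 = '.' then some (PySem.List.slice cs (some (p.1 + 1)) none) else none)

def domain_score_py_alt (domain : String) : Int :=
  let cs := domain.toList
  if cs = [] then 0
  else if pvPreferred.contains cs then 3
  else
    let tails := pvTails cs
    if tails.any (fun t => pvPreferred.contains t) then 2
    else if pvLowSignal.contains cs || tails.any (fun t => pvLowSignal.contains t) then -2
    else 1

-- ===== PRECONDITION & SPEC =====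
def Spec_domain_score_py (domain : String) (out : Int) : Prop := out = domain_score_py_alt domain
instance (domain : String) (out : Int) : Decidable (Spec_domain_score_py domain out) := by unfold Spec_domain_score_py; infer_instance

-- ===== CLAIM (what is proved, stated in full; the proofs are below) =====
def Claim_equal_domain_score_py : Prop := ∀ (domain : String), Dom_domain_score_py domain → Spec_domain_score_py domain (domain_score_py domain)

-- ===== LEMMAS AND PROOFS =====

-- B's tails are exactly the words d with cs ending in '.' ++ d
lemma mem_pvTails (cs d : List Char) : d ∈ pvTails cs ↔ ('.' :: d) <:+ cs := by
  unfold pvTails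
  simp only [List.mem_filterMap, PySem.List.mem_enumerate_iff]
  constructor
  · rintro ⟨p, ⟨k, hk, rfl⟩, hif⟩
    by_cases hc : cs[k] = '.'
    · rw [if_pos hc, Option.some.injEq] at hif
      have hcast : ((0 : Int) + (k : Int) + 1) = ((k + 1 : Nat) : Int) := by push_cast; ring
      rw [hcast, PySem.List.slice_from_natCast] at hif
      subst hif
      have h2 : ('.' :: cs.drop (k + 1)) = cs.drop k := by
        rw [← hc]; exact List.getElem_cons_drop hk
      rw [h2]; exact List.drop_suffix k cs
    · rw [if_neg hc] at hif; exact absurd hif (by simp)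
  · rintro ⟨t, rfl⟩
    refine ⟨((0 : Int) + (t.length : Int), '.'), ⟨t.length, by simp, by simp⟩, ?_⟩
    have hcast : ((0 : Int) + (t.length : Int) + 1) = ((t.length + 1 : Nat) : Int) := by push_cast; ring
    rw [if_pos rfl, hcast, PySem.List.slice_from_natCast, Option.some.injEq]
    simp

-- the two membership tests coincide for any constant list L
lemma pvTails_any_eq (cs : List Char) (L : List (List Char)) :
    (pvTails cs).any (fun t => L.contains t)
      = L.any (fun d => PySem.Chars.endswith cs ('.' :: d)) := by
  rw [Bool.eq_iff_iff]
  simp only [List.any_eq_true, PySem.Chars.endswith_iff, mem_pvTails, List.contains_iff_mem]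
  exact ⟨fun ⟨t, h1, h2⟩ => ⟨t, h2, h1⟩, fun ⟨d, h1, h2⟩ => ⟨d, h2, h1⟩⟩

-- ===== VERDICT (by name: the statement is the Claim_ definition above) =====
theorem domain_score_py_spec : Claim_equal_domain_score_py := by
  intro domain _
  unfold Spec_domain_score_py domain_score_py domain_score_py_alt
  simp only [pvTails_any_eq]
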